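-- pv_equiv track=rewrite | github.com/romerik/Coding_Interview_Prep | Python/No_Repeats_Please.py | findPermutations
-- ===== SOURCE A (Python) =====
-- def hasNotRepeat(string):
--     if len(string) <=1:
--         return True
--     else:
--         for char in set(string):
--             index = string.find(char)
--             if index!=-1 and index!=len(string)-1:
--                 if string[index]==string[index+1]:
--                     return False
--         return True
--
-- def findPermutations(string):
--     if len(string) < 2:
--         return string
--
--     permutationsArray = []
--
--     for index,char in enumerate(string):
--         remainingChars = string[0:index] + string[index+1:]
--
--         for permutation in findPermutations(remainingChars):
--             if hasNotRepeat(char+permutation):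
--                 permutationsArray.append(char+permutation)
--
--     return permutationsArray
-- ===== SOURCE B (Python) =====
-- def findPermutations(string):
--     if len(string) < 2:
--         return string
--     # BFS over (prefix, remaining-chars) states, pruning a branch as soon as the
--     # next character would repeat the last one; after len(string) rounds the
--     # surviving prefixes are exactly the no-adjacent-repeat permutations, in the
--     # same index order A's recursion produces them.
--     states = [("", string)]
--     for _ in range(len(string)):
--         nxt = []
--         for pre, rem in states:
--             for i, ch in enumerate(rem):
--                 if pre and pre[-1] == ch:
--                     continue
--                 nxt.append((pre + ch, rem[:i] + rem[i + 1:]))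
--         states = nxt
--     return [p for p, _ in states]
-- ===== Notes on version B (the rewrite author's own statement) =====
-- stated objective: faster
-- what changed: Replaces A's recursion (which builds all permutations of each remainder and re-scans every candidate with the set-based hasNotRepeat check) by an iterative BFS over (prefix, remaining) states that prunes adjacent repeats with a single O(1) last-character comparison, never calling hasNotRepeat.
-- outside the precondition, e.g. on findPermutations('a'): A returns 'a', B returns 'a'
import Mathlib
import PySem

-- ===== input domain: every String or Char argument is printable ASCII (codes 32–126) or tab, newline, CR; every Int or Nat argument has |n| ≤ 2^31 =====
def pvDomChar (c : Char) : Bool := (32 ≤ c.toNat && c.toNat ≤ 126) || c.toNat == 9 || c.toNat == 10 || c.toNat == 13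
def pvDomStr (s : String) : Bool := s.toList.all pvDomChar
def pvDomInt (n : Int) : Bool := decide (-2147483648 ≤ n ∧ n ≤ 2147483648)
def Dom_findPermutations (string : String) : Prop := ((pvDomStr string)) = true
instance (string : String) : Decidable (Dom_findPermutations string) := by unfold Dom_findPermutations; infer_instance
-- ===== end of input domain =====

-- B replaces A's recursion with its repeated set-based hasNotRepeat rescans by an iterative
-- BFS over (prefix, remaining) states pruned with an O(1) last-character comparison;
-- return values proved equal on strings of length ≥ 2 (Pre_).

-- ===== PORT A =====
-- port of hasNotRepeat (on the character list of its string argument; the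
-- 'for char in set(string): … return False' loop is order-independent, ported as .all)
def hasNotRepeat (l : List Char) : Bool :=
  if l.length ≤ 1 then true
  else
    (PySem.Set.ofList l).all fun c =>
      let index := PySem.Chars.find l [c]
      !(index ≠ -1 && index ≠ (l.length : Int) - 1 &&
        (PySem.List.pyGetD l index 'a' == PySem.List.pyGetD l (index + 1) 'a'))

-- the recursion of A over the character list; the outer wrapper converts to String at the end
def findPermAux (l : List Char) : List (List Char) :=
  if l.length < 2 then [l]
  else
    (PySem.List.enumerate l).attach.flatMap fun ic =>
      ((findPermAux (PySem.List.slice l none (some ic.1.1) ++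
                     PySem.List.slice l (some (ic.1.1 + 1)) none)).filter
          (fun p => hasNotRepeat (ic.1.2 :: p))).map (ic.1.2 :: ·)
termination_by l.length
decreasing_by
  obtain ⟨k, hk, hval⟩ := (PySem.List.mem_enumerate_iff _ _ _).1 ic.2
  simp only [hval, Int.zero_add]
  rw [PySem.List.slice_to_natCast]
  rw [show ((k : Int) + 1) = ((k + 1 : Nat) : Int) by push_cast; ring, PySem.List.slice_from_natCast]
  simp only [List.length_append, List.length_take, List.length_drop]
  omega

def findPermutations (string : String) : List String :=
  let l := string.toList
  if l.length < 2 then [string]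
  else (findPermAux l).map (fun p => String.mk p)

-- ===== PORT B =====
-- one BFS round: extend every (prefix, remaining) state by each remaining character,
-- skipping extensions that repeat the prefix's last character ('continue')
def stepB (states : List (List Char × List Char)) : List (List Char × List Char) :=
  states.flatMap fun s =>
    (PySem.List.enumerate s.2).flatMap fun ic =>
      if s.1 ≠ [] ∧ PySem.List.pyGetD s.1 (-1) 'a' = ic.2 then []
      else [(s.1 ++ [ic.2],
             PySem.List.slice s.2 none (some ic.1) ++ PySem.List.slice s.2 (some (ic.1 + 1)) none)]

def findPermutations_alt (string : String) : List String :=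
  let l := string.toList
  if l.length < 2 then [string]
  else
    (((List.range l.length).foldl (fun st _ => stepB st) [(([] : List Char), l)]).map
      (fun s => String.mk s.1))

-- ===== PRECONDITION & SPEC =====
-- Pre_ excludes strings of length < 2, on which the Python A (and B) return the bare
-- string itself — a str, not a list of str, so not a value of the declared return type.
def Pre_findPermutations (string : String) : Prop := 2 ≤ string.toList.length
instance (string : String) : Decidable (Pre_findPermutations string) := by
  unfold Pre_findPermutations; infer_instance
def pvWitness_findPermutations : String := "ab"
def Spec_findPermutations (string : String) (out : List String) : Prop := out = findPermutations_alt string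
instance (string : String) (out : List String) : Decidable (Spec_findPermutations string out) := by unfold Spec_findPermutations; infer_instance

-- ===== CLAIM (what is proved, stated in full; the proofs are below) =====
def Claim_equal_findPermutations : Prop := ∀ (string : String), Dom_findPermutations string → Pre_findPermutations string → Spec_findPermutations string (findPermutations string)

-- ===== LEMMAS AND PROOFS =====

-- no two adjacent equal characters
def okB : List Char → Bool
  | [] => true
  | [_] => true
  | a :: b :: t => (a != b) && okB (b :: t)

-- the head of p may not equal the character o (the prefix's last character)
def headOk (o : Option Char) (p : List Char) : Bool :=
  match o, p with
  | some c, b :: _ => c != b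
  | _, _ => true

theorem headOk_cons (o : Option Char) (c : Char) (q : List Char) :
    headOk o (c :: q) = !(o == some c) := by
  cases o <;> simp [headOk, bne]

theorem okB_cons (c : Char) (q : List Char) :
    okB (c :: q) = (headOk (some c) q && okB q) := by
  cases q <;> simp [okB, headOk]

-- n-fold application of stepB, peeling from the inside (matches the foldl over range)
def iterB : Nat → List (List Char × List Char) → List (List Char × List Char)
  | 0, st => st
  | n + 1, st => iterB n (stepB st)

theorem iterB_succ' (n : Nat) (st : List (List Char × List Char)) :
    iterB (n + 1) st = stepB (iterB n st) := by
  induction n generalizing st with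
  | zero => rfl
  | succ n ih => simpa [iterB] using ih (stepB st)

theorem foldl_range_stepB (n : Nat) (st : List (List Char × List Char)) :
    (List.range n).foldl (fun s _ => stepB s) st = iterB n st := by
  induction n with
  | zero => rfl
  | succ n ih => rw [List.range_succ, List.foldl_append, ih, List.foldl_cons, List.foldl_nil,
      ← iterB_succ']

theorem stepB_append (xs ys : List (List Char × List Char)) :
    stepB (xs ++ ys) = stepB xs ++ stepB ys := by
  simp [stepB]

theorem iterB_nil (n : Nat) : iterB n [] = [] := by
  induction n with
  | zero => rfl
  | succ n ih => simpa [iterB, stepB] using ih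

theorem iterB_append (n : Nat) (xs ys : List (List Char × List Char)) :
    iterB n (xs ++ ys) = iterB n xs ++ iterB n ys := by
  induction n generalizing xs ys with
  | zero => rfl
  | succ n ih => simp [iterB, stepB_append, ih]

theorem iterB_flatMap {α : Type} (n : Nat) (xs : List α)
    (g : α → List (List Char × List Char)) :
    iterB n (xs.flatMap g) = xs.flatMap (fun x => iterB n (g x)) := by
  induction xs with
  | nil => simpa using iterB_nil n
  | cons x xs ih =>
      rw [List.flatMap_cons, iterB_append, ih, List.flatMap_cons]

theorem okB_get (l : List Char) (h : okB l = true) (i : Nat) (h1 : i + 1 < l.length) :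
    l[i]'(by omega) ≠ l[i + 1]'h1 := by
  induction l generalizing i with
  | nil => simp at h1
  | cons a t ih =>
      cases t with
      | nil => simp at h1
      | cons b t =>
          simp only [okB, Bool.and_eq_true, bne_iff_ne] at h
          cases i with
          | zero => simpa using h.1
          | succ i => exact ih h.2 i (by simpa using h1)

theorem find_single_go (c : Char) (l : List Char) (i : Nat) :
    PySem.Chars.find.go [c] l i = -1 ∨
      ∃ k : Nat, ∃ hk : k < l.length, PySem.Chars.find.go [c] l i = ((i + k : Nat) : Int) ∧ l[k] = c := by
  induction l generalizing i with
  | nil => left; simp [PySem.Chars.find.go]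
  | cons d t ih =>
      by_cases h : c = d
      · right; exact ⟨0, by simp, by simp [PySem.Chars.find.go, h], h.symm⟩
      · rw [show PySem.Chars.find.go [c] (d :: t) i = PySem.Chars.find.go [c] t (i + 1) by
          simp [PySem.Chars.find.go, List.isPrefixOf, h]]
        rcases ih (i + 1) with h1 | ⟨k, hk, h1, h2⟩
        · left; exact h1
        · right; exact ⟨k + 1, by simpa using hk, by rw [h1]; push_cast; ring_nf, by simpa using h2⟩

-- (P1) a string with no adjacent equal characters passes hasNotRepeat
theorem hasNotRepeat_of_okB (l : List Char) (h : okB l = true) : hasNotRepeat l = true := by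
  unfold hasNotRepeat
  split
  · rfl
  · rw [List.all_eq_true]
    intro c hc
    rcases find_single_go c l 0 with h1 | ⟨k, hk, h1, h2⟩
    · simp [PySem.Chars.find, h1]
    · simp only [PySem.Chars.find, h1, Nat.zero_add]
      by_cases hke : (k : Int) = (l.length : Int) - 1
      · simp [hke]
      · have hk1 : k + 1 < l.length := by omega
        have e1 : PySem.List.pyGetD l ((k : Nat) : Int) 'a' = l[k] := by
          rw [PySem.List.pyGetD_natCast]; exact List.getD_eq_getElem l 'a' hk
        have e2 : PySem.List.pyGetD l (((k : Nat) : Int) + 1) 'a' = l[k + 1] := by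
          rw [show ((k : Nat) : Int) + 1 = ((k + 1 : Nat) : Int) by push_cast; ring,
            PySem.List.pyGetD_natCast]
          exact List.getD_eq_getElem l 'a' hk1
        simp only [e1, e2]
        simp [okB_get l h k hk1]

-- (P2) a string starting with a doubled character fails hasNotRepeat
theorem hasNotRepeat_dup (a : Char) (t : List Char) : hasNotRepeat (a :: a :: t) = false := by
  unfold hasNotRepeat
  rw [if_neg (by simp)]
  rw [List.all_eq_false]
  refine ⟨a, ?_, ?_⟩
  · rw [PySem.Set.mem_ofList]; simp
  · have hf : PySem.Chars.find (a :: a :: t) [a] = 0 := by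
      simp [PySem.Chars.find, PySem.Chars.find.go]
    simp [hf, PySem.List.pyGetD]
    omega

-- the incremental check of A agrees with B's O(1) last-character check on repeat-free tails
theorem hasNotRepeat_cons_of_okB (c : Char) (p : List Char) (h : okB p = true) :
    hasNotRepeat (c :: p) = headOk (some c) p := by
  cases p with
  | nil => simp [hasNotRepeat, headOk]
  | cons b t =>
      by_cases hcb : c = b
      · subst hcb; simp [hasNotRepeat_dup, headOk]
      · have : okB (c :: b :: t) = true := by
          simp only [okB, Bool.and_eq_true, bne_iff_ne]; exact ⟨hcb, h⟩
        rw [hasNotRepeat_of_okB _ this]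
        simp [headOk, bne_iff_ne, hcb]

-- unfolding findPermAux without the attach wrapper, for length ≥ 2
theorem findPermAux_eq (l : List Char) (h : 2 ≤ l.length) :
    findPermAux l = (PySem.List.enumerate l).flatMap fun ic =>
      ((findPermAux (PySem.List.slice l none (some ic.1) ++
                     PySem.List.slice l (some (ic.1 + 1)) none)).filter
          (fun p => hasNotRepeat (ic.2 :: p))).map (ic.2 :: ·) := by
  rw [findPermAux, if_neg (by omega)]
  have h1 := List.flatMap_subtype
    (l := (PySem.List.enumerate l).attach)
    (f := fun ic =>
      ((findPermAux (PySem.List.slice l none (some ic.1.1) ++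
                     PySem.List.slice l (some (ic.1.1 + 1)) none)).filter
          (fun p => hasNotRepeat (ic.1.2 :: p))).map (ic.1.2 :: ·))
    (g := fun ic =>
      ((findPermAux (PySem.List.slice l none (some ic.1) ++
                     PySem.List.slice l (some (ic.1 + 1)) none)).filter
          (fun p => hasNotRepeat (ic.2 :: p))).map (ic.2 :: ·))
    (fun x h => rfl)
  rw [List.unattach_attach] at h1
  exact h1

-- the Python str[-1] test of B read as a getLast? condition
theorem badCond (pre : List Char) (c : Char) :
    (pre ≠ [] ∧ PySem.List.pyGetD pre (-1) 'a' = c) ↔ pre.getLast? = some c := by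
  cases hp : pre with
  | nil => simp
  | cons x xs =>
      rw [PySem.List.pyGetD_neg_one (x :: xs) 'a' (by simp)]
      simp [List.getLast?_eq_some_getLast]

-- every result of findPermAux has no adjacent equal characters
theorem okB_findPermAux (l : List Char) (p : List Char) (hp : p ∈ findPermAux l) :
    okB p = true := by
  have main : ∀ n (l p : List Char), l.length = n → p ∈ findPermAux l → okB p = true := by
    intro n
    induction n using Nat.strong_induction_on with
    | _ n ih =>
      intro l p hn hp
      by_cases h2 : l.length < 2
      · rw [findPermAux, if_pos h2] at hp
        simp only [List.mem_singleton] at hp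
        rw [hp]
        cases l with
        | nil => rfl
        | cons a t =>
            cases t with
            | nil => rfl
            | cons b t => simp at h2
      · rw [findPermAux_eq l (by omega)] at hp
        simp only [List.mem_flatMap, List.mem_map, List.mem_filter] at hp
        obtain ⟨ic, hic, q, ⟨hq, hrep⟩, rfl⟩ := hp
        obtain ⟨k, hk, hval⟩ := (PySem.List.mem_enumerate_iff _ _ _).1 hic
        rw [hval] at hq
        simp only [Int.zero_add] at hq
        rw [PySem.List.slice_to_natCast,
          show ((k : Int) + 1) = ((k + 1 : Nat) : Int) by push_cast; ring,
          PySem.List.slice_from_natCast] at hq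
        have hq' : okB q = true := by
          refine ih (l.take k ++ l.drop (k + 1)).length ?_ _ _ rfl hq
          simp only [List.length_append, List.length_take, List.length_drop]
          omega
        rw [okB_cons, hq', Bool.and_true]
        cases q with
        | nil => rfl
        | cons b t =>
            by_cases hcb : ic.2 = b
            · rw [hcb, hasNotRepeat_dup] at hrep; exact absurd hrep (by simp)
            · simp [headOk, bne_iff_ne, hcb]
  exact main l.length l p rfl hp

-- the BFS invariant: n rounds on a single state (pre, l) with |l| = n produce exactly the
-- A-results for l that do not clash with pre's last character, each appended to pre
theorem iterB_invariant (n : Nat) (l pre : List Char) (hn : l.length = n) :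
    iterB n [(pre, l)] =
      ((findPermAux l).filter (fun p => headOk pre.getLast? p)).map
        (fun p => (pre ++ p, ([] : List Char))) := by
  induction n using Nat.strong_induction_on generalizing l pre with
  | _ n ih =>
    match n with
    | 0 =>
        have : l = [] := List.length_eq_zero_iff.mp hn
        subst this
        simp [iterB, findPermAux, headOk]
    | 1 =>
        obtain ⟨c, rfl⟩ : ∃ c, l = [c] := by
          match l, hn with
          | [c], _ => exact ⟨c, rfl⟩
        have hperm : findPermAux [c] = [[c]] := by rw [findPermAux]; simp
        rw [show iterB 1 [(pre, [c])] = stepB [(pre, [c])] from rfl, hperm]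
        simp only [stepB, List.flatMap_cons, List.flatMap_nil, List.append_nil,
          PySem.List.enumerate]
        by_cases hbad : pre.getLast? = some c
        · rw [if_pos ((badCond pre c).mpr hbad)]
          simp [headOk_cons, hbad]
        · rw [if_neg (fun hc => hbad ((badCond pre c).mp hc))]
          simp [headOk_cons, hbad, PySem.List.slice, PySem.List.clampIdx]
    | (m + 2) =>
        have h2 : 2 ≤ l.length := by omega
        rw [show iterB (m + 2) [(pre, l)] = iterB (m + 1) (stepB [(pre, l)]) from rfl]
        rw [show stepB [(pre, l)] = (PySem.List.enumerate l).flatMap (fun ic =>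
            if pre ≠ [] ∧ PySem.List.pyGetD pre (-1) 'a' = ic.2 then []
            else [(pre ++ [ic.2],
              PySem.List.slice l none (some ic.1) ++ PySem.List.slice l (some (ic.1 + 1)) none)])
          from by simp [stepB]]
        rw [iterB_flatMap, findPermAux_eq l h2, List.filter_flatMap, List.map_flatMap]
        refine List.flatMap_congr ?_
        intro ic hic
        obtain ⟨k, hk, hval⟩ := (PySem.List.mem_enumerate_iff _ _ _).1 hic
        rw [hval]
        simp only [Int.zero_add]
        rw [PySem.List.slice_to_natCast,
          show ((k : Int) + 1) = ((k + 1 : Nat) : Int) by push_cast; ring,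
          PySem.List.slice_from_natCast]
        by_cases hbad : pre.getLast? = some l[k]
        · rw [if_pos ((badCond pre l[k]).mpr hbad)]
          simp [iterB_nil, List.filter_map, Function.comp_def, headOk_cons, hbad]
        · rw [if_neg (fun hc => hbad ((badCond pre l[k]).mp hc))]
          have hrem : (l.take k ++ l.drop (k + 1)).length = m + 1 := by
            simp only [List.length_append, List.length_take, List.length_drop]
            omega
          rw [ih (m + 1) (by omega) _ _ hrem, List.getLast?_concat]
          have hfc : List.filter (fun p => hasNotRepeat (l[k] :: p))
              (findPermAux (List.take k l ++ List.drop (k + 1) l)) =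
              List.filter (fun q => headOk (some l[k]) q)
              (findPermAux (List.take k l ++ List.drop (k + 1) l)) :=
            List.filter_congr (fun q hq =>
              hasNotRepeat_cons_of_okB l[k] q (okB_findPermAux _ _ hq))
          rw [hfc]
          have hbeq : (pre.getLast? == some l[k]) = false := by
            simpa using hbad
          simp [List.filter_map, Function.comp_def, headOk_cons, hbeq]

-- ===== VERDICT (by name: the statement is the Claim_ definition above) =====
theorem findPermutations_spec : Claim_equal_findPermutations := by
  intro s _ hpre
  unfold Spec_findPermutations findPermutations findPermutations_alt
  have h2 : 2 ≤ s.toList.length := hpre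
  rw [if_neg (by omega), if_neg (by omega), foldl_range_stepB,
    iterB_invariant s.toList.length s.toList [] rfl]
  simp [headOk]
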